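-- pv_equiv track=rewrite | github.com/frainfreeze/studying | tmp/practice/other/03__mojPosao.py | processLine
-- ===== SOURCE A (Python) =====
-- import string
--
-- def processLine(inputLine):
--     # stackoverflow.com/questions/16060899
--     for ch in string.punctuation:
--         if ch in inputLine:
--             inputLine=inputLine.replace(ch,"?")
--
--     for ch in string.ascii_lowercase:
--         if ch in inputLine:
--             inputLine=inputLine.replace(ch,"-")
--
--     for ch in string.digits:
--         if str(ch) in inputLine:
--             inputLine=inputLine.replace(str(ch),"*")
--
--     return inputLine
-- ===== SOURCE B (Python) =====
-- import string
--
-- def processLine(inputLine):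
--     # single classification pass instead of three sequential replace passes
--     out = []
--     for ch in inputLine:
--         if ch in string.punctuation:
--             out.append("?")
--         elif ch in string.ascii_lowercase:
--             out.append("-")
--         elif ch in string.digits:
--             out.append("*")
--         else:
--             out.append(ch)
--     return "".join(out)
-- ===== Notes on version B (the rewrite author's own statement) =====
-- stated objective: simpler
-- what changed: Replaces the three sequential whole-string replace passes (one per character of punctuation/ascii_lowercase/digits, 68 scans) by a single left-to-right pass that classifies each character once; equivalence relies on the three classes being disjoint and the sentinel characters never being re-hit by later passes.
import Mathlib
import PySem

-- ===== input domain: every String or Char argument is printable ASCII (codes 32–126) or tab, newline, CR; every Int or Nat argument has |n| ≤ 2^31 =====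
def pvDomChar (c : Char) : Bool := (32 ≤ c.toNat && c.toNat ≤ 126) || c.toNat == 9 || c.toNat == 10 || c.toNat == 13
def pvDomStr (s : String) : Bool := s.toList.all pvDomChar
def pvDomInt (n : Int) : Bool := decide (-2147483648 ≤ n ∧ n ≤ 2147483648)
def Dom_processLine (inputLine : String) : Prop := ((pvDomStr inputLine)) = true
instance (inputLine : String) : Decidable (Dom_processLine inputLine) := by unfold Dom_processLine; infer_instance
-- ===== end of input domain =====

-- B replaces the three sequential replace passes by one classification pass (objective: simpler).

-- shared constants: string.punctuation / string.ascii_lowercase / string.digits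
def punctChars : List Char := "!\"#$%&'()*+,-./:;<=>?@[\\]^_`{|}~".toList
def lowerChars : List Char := "abcdefghijklmnopqrstuvwxyz".toList
def digitChars : List Char := "0123456789".toList

-- ===== PORT A =====
-- one Python 'for ch in <constant>: if ch in inputLine: inputLine = inputLine.replace(ch, r)' loop
def passA (chs : List Char) (r : Char) (s : String) : String :=
  chs.foldl (fun acc ch =>
    if PySem.Str.isIn (String.ofList [ch]) acc then
      PySem.Str.replace acc (String.ofList [ch]) (String.ofList [r])
    else acc) s

def processLine (inputLine : String) : String :=
  passA digitChars '*' (passA lowerChars '-' (passA punctChars '?' inputLine))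

-- ===== PORT B =====
def classifyB (c : Char) : Char :=
  if punctChars.contains c then '?'
  else if lowerChars.contains c then '-'
  else if digitChars.contains c then '*'
  else c

def processLine_alt (inputLine : String) : String :=
  String.ofList (inputLine.toList.map classifyB)

-- ===== PRECONDITION & SPEC =====
def Spec_processLine (inputLine : String) (out : String) : Prop := out = processLine_alt inputLine
instance (inputLine : String) (out : String) : Decidable (Spec_processLine inputLine out) := by unfold Spec_processLine; infer_instance

-- ===== CLAIM (what is proved, stated in full; the proofs are below) =====
def Claim_equal_processLine : Prop := ∀ (inputLine : String), Dom_processLine inputLine → Spec_processLine inputLine (processLine inputLine)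

-- ===== LEMMAS AND PROOFS =====

def substC (ch r c : Char) : Char := if c = ch then r else c

theorem go_single (ch r : Char) : ∀ (fuel : Nat) (l acc : List Char), l.length ≤ fuel →
    PySem.Chars.replace.go [ch] [r] fuel l acc = acc.reverse ++ l.map (substC ch r) := by
  intro fuel
  induction fuel with
  | zero =>
    intro l acc h
    have : l = [] := List.eq_nil_of_length_eq_zero (Nat.le_zero.mp h)
    subst this; simp [PySem.Chars.replace.go]
  | succ n ih =>
    intro l acc h
    cases l with
    | nil => simp [PySem.Chars.replace.go]
    | cons c t =>
      rw [PySem.Chars.replace.go]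
      by_cases hc : ch = c
      · subst hc
        simp only [List.isPrefixOf, Bool.and_true, beq_self_eq_true,
          if_pos]
        rw [ih _ _ (by simpa using Nat.le_of_succ_le_succ h)]
        simp [substC]
      · have : List.isPrefixOf [ch] (c :: t) = false := by
          simp [List.isPrefixOf, hc]
        rw [this]
        simp only [Bool.false_eq_true, if_false]
        rw [ih _ _ (by simpa using Nat.le_of_succ_le_succ h)]
        have hne : c ≠ ch := fun e => hc e.symm
        simp [substC, hne]

theorem replace_single (ch r : Char) (l : List Char) :
    PySem.Chars.replace l [ch] [r] = l.map (substC ch r) := by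
  rw [PySem.Chars.replace]
  simp only [List.isEmpty_cons, Bool.false_eq_true, if_false]
  simpa using go_single ch r l.length l [] (le_refl _)

theorem not_mem_of_isIn_false (ch : Char) (s : String)
    (h : PySem.Str.isIn (String.ofList [ch]) s = false) : ch ∉ s.toList := by
  intro hmem
  have hfind : PySem.Chars.find s.toList [ch] = -1 := by
    simp only [PySem.Str.isIn, PySem.Chars.isIn, bne_eq_false_iff_eq,
      String.toList_ofList] at h
    exact h
  have := PySem.Chars.findFrom_natCast_eq_neg_one_iff s.toList [ch] 0 (by simp)
  rw [show ((0:Nat):Int) = 0 from rfl, PySem.Chars.findFrom_zero] at this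
  have h2 := this.mp hfind
  rw [List.drop_zero] at h2
  exact h2 ((List.singleton_infix_iff ch s.toList).mpr hmem)

-- one step of a pass maps substC over the characters
theorem step_toList (ch r : Char) (s : String) :
    (if PySem.Str.isIn (String.ofList [ch]) s then
      PySem.Str.replace s (String.ofList [ch]) (String.ofList [r]) else s).toList
      = s.toList.map (substC ch r) := by
  by_cases h : PySem.Str.isIn (String.ofList [ch]) s = true
  · rw [if_pos h]
    simp only [PySem.Str.replace, String.toList_ofList]
    exact replace_single ch r s.toList
  · rw [if_neg h]
    have hnm := not_mem_of_isIn_false ch s (by simpa using h)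
    symm
    apply List.map_congr_left ?_ |>.trans (List.map_id _)
    intro c hc
    have : c ≠ ch := fun e => hnm (e ▸ hc)
    simp [substC, this]

def gsub (chs : List Char) (r c : Char) : Char := if c ∈ chs then r else c

theorem passA_toList (r : Char) : ∀ (chs : List Char) (s : String),
    (passA chs r s).toList = s.toList.map (gsub chs r) := by
  intro chs
  induction chs with
  | nil =>
    intro s
    have : gsub [] r = id := by funext c; simp [gsub]
    simp [passA, this]
  | cons ch rest ih =>
    intro s
    rw [passA, List.foldl_cons]
    rw [show ∀ x, List.foldl _ x rest = passA rest r x from fun _ => rfl]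
    rw [ih, step_toList, List.map_map]
    apply List.map_congr_left
    intro c _
    by_cases hc : c = ch
    · subst hc
      simp only [Function.comp, substC, gsub, List.mem_cons, true_or, if_pos]
      by_cases hr : r ∈ rest <;> simp [hr]
    · simp [Function.comp, substC, hc, gsub, List.mem_cons]

theorem classify_eq (c : Char) :
    gsub digitChars '*' (gsub lowerChars '-' (gsub punctChars '?' c)) = classifyB c := by
  by_cases hp : c ∈ punctChars
  · have h1 : gsub punctChars '?' c = '?' := if_pos hp
    rw [h1]
    have : gsub lowerChars '-' '?' = '?' := if_neg (by decide)
    rw [this]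
    have : gsub digitChars '*' '?' = '?' := if_neg (by decide)
    rw [this, classifyB, if_pos (by simpa using hp)]
  · rw [show gsub punctChars '?' c = c from if_neg hp]
    by_cases hl : c ∈ lowerChars
    · rw [show gsub lowerChars '-' c = '-' from if_pos hl]
      rw [show gsub digitChars '*' '-' = '-' from if_neg (by decide)]
      rw [classifyB, if_neg (by simpa using hp), if_pos (by simpa using hl)]
    · rw [show gsub lowerChars '-' c = c from if_neg hl]
      by_cases hd : c ∈ digitChars
      · rw [show gsub digitChars '*' c = '*' from if_pos hd]
        rw [classifyB, if_neg (by simpa using hp), if_neg (by simpa using hl),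
          if_pos (by simpa using hd)]
      · rw [show gsub digitChars '*' c = c from if_neg hd]
        rw [classifyB, if_neg (by simpa using hp), if_neg (by simpa using hl),
          if_neg (by simpa using hd)]

-- ===== VERDICT (by name: the statement is the Claim_ definition above) =====
theorem processLine_spec : Claim_equal_processLine := by
  intro s _
  unfold Spec_processLine processLine processLine_alt
  have h : (passA digitChars '*' (passA lowerChars '-' (passA punctChars '?' s))).toList
      = s.toList.map classifyB := by
    rw [passA_toList, passA_toList, passA_toList, List.map_map, List.map_map]
    exact List.map_congr_left (fun c _ => classify_eq c)
  rw [← h, String.ofList_toList]
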